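-- pv_equiv track=rewrite | github.com/vmatevicius/Code_Academy | week_three/day_three/lists.py | compare_list_values
-- ===== SOURCE A (Python) =====
-- def compare_list_values(list_one, list_two) -> bool:
--     new_list = []
--     index = 0
--     if len(list_one) != len(list_two):
--         return False
--     while index != len(list_one):
--         new_value = list_one[index] + list_two[index]
--         new_list.append(new_value)
--         index += 1
--     if len(set(new_list)) == 1:
--         return True
--     else:
--         return False
-- ===== SOURCE B (Python) =====
-- def compare_list_values(list_one, list_two) -> bool:
--     if len(list_one) != len(list_two):
--         return False
--     if not list_one:
--         return False
--     ref = list_one[0] + list_two[0]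
--     return all(a + b == ref for a, b in zip(list_one, list_two))
-- ===== Notes on version B (the rewrite author's own statement) =====
-- stated objective: simpler
-- what changed: Instead of materialising a list of element-wise sums and deduplicating it through a set, B streams over zip(list_one, list_two) comparing each pairwise sum to the first sum, with an explicit empty guard.
import Mathlib
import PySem

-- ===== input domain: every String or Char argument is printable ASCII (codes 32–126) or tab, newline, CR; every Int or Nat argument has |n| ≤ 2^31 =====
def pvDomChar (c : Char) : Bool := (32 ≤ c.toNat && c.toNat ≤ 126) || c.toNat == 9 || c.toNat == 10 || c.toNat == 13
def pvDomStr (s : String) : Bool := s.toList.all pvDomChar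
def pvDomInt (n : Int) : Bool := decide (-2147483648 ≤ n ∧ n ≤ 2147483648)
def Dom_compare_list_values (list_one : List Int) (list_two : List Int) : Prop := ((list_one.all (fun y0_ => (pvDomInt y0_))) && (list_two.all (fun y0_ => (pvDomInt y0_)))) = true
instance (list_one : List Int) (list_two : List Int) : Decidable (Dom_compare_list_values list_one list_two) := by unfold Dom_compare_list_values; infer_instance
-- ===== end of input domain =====

-- B replaces the sums-list + set deduplication with a single streaming pass comparing each pairwise sum to the first one (objective: simpler).

-- ===== PORT A =====
def compare_list_values (list_one : List Int) (list_two : List Int) : Bool :=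
  if PySem.List.len list_one ≠ PySem.List.len list_two then false
  else
    -- the while loop over index builds new_list of element-wise sums
    let new_list := (PySem.List.pyRange 0 (PySem.List.len list_one) 1).foldl
      (fun acc index => acc ++ [PySem.List.pyGetD list_one index 0 + PySem.List.pyGetD list_two index 0]) []
    if PySem.Set.len (PySem.Set.ofList new_list) == 1 then true else false

-- ===== PORT B =====
def compare_list_values_alt (list_one : List Int) (list_two : List Int) : Bool :=
  if PySem.List.len list_one ≠ PySem.List.len list_two then false
  else if list_one.isEmpty then false
  else
    let ref := PySem.List.pyGetD list_one 0 0 + PySem.List.pyGetD list_two 0 0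
    (list_one.zip list_two).all (fun p => p.1 + p.2 == ref)

-- ===== PRECONDITION & SPEC =====
def Spec_compare_list_values (list_one : List Int) (list_two : List Int) (out : Bool) : Prop := out = compare_list_values_alt list_one list_two
instance (list_one : List Int) (list_two : List Int) (out : Bool) : Decidable (Spec_compare_list_values list_one list_two out) := by unfold Spec_compare_list_values; infer_instance

-- ===== CLAIM (what is proved, stated in full; the proofs are below) =====
def Claim_equal_compare_list_values : Prop := ∀ (list_one : List Int) (list_two : List Int), Dom_compare_list_values list_one list_two → Spec_compare_list_values list_one list_two (compare_list_values list_one list_two)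

-- ===== LEMMAS AND PROOFS =====

-- the index loop produces exactly the element-wise sums
lemma pv_sums_eq (l1 l2 : List Int) (h : l1.length = l2.length) :
    (PySem.List.pyRange 0 (PySem.List.len l1) 1).map
      (fun i => PySem.List.pyGetD l1 i 0 + PySem.List.pyGetD l2 i 0)
    = List.zipWith (· + ·) l1 l2 := by
  apply List.ext_getElem
  · simp [PySem.List.length_pyRange_one, h]
  · intro i h1 h2
    simp only [List.getElem_map, PySem.List.getElem_pyRange_one, List.getElem_zipWith,
      zero_add, PySem.List.pyGetD_natCast]
    have hi1 : i < l1.length := by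
      simpa [PySem.List.length_pyRange_one] using h1
    rw [List.getD_eq_getElem _ _ hi1, List.getD_eq_getElem _ _ (h ▸ hi1)]

lemma pv_foldl_add_const (xs : List Int) (a : Int) (h : ∀ x ∈ xs, x = a) :
    xs.foldl PySem.Set.add [a] = [a] := by
  induction xs with
  | nil => rfl
  | cons y ys ih =>
    have hya : y = a := h y (by simp)
    rw [List.foldl_cons]
    have : PySem.Set.add [a] y = [a] := by
      simp [hya, PySem.Set.add, PySem.Set.contains]
    rw [this]
    exact ih (fun x hx => h x (by simp [hx]))

lemma pv_zip_all (a b : Int) (t1 t2 : List Int) :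
    (t1.zip t2).all (fun p => p.1 + p.2 == a + b)
    = (List.zipWith (· + ·) t1 t2).all (fun x => x == a + b) := by
  induction t1 generalizing t2 with
  | nil => cases t2 <;> rfl
  | cons x xs ih =>
    cases t2 with
    | nil => rfl
    | cons y ys => simp [ih]

-- set(a :: xs) has one element iff every element of xs equals a
lemma pv_setlen_one_iff (a : Int) (xs : List Int) :
    (PySem.Set.ofList (a :: xs)).length = 1 ↔ ∀ x ∈ xs, x = a := by
  constructor
  · intro hlen x hx
    match hs : PySem.Set.ofList (a :: xs), hlen with
    | [c], _ =>
      have ha : a = c := by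
        have := (PySem.Set.mem_ofList (xs := a :: xs) (y := a)).2 (by simp)
        simpa [hs] using this
      have hxc : x = c := by
        have := (PySem.Set.mem_ofList (xs := a :: xs) (y := x)).2 (by simp [hx])
        simpa [hs] using this
      omega
  · intro hall
    have hfe : PySem.Set.ofList (a :: xs) = [a] := by
      rw [PySem.Set.ofList_eq_foldl, List.foldl_cons]
      have h0 : PySem.Set.add ([] : List Int) a = [a] := rfl
      rw [h0]
      exact pv_foldl_add_const xs a hall
    simp [hfe]

-- ===== VERDICT (by name: the statement is the Claim_ definition above) =====
theorem compare_list_values_spec : Claim_equal_compare_list_values := by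
  intro l1 l2 _
  unfold Spec_compare_list_values compare_list_values compare_list_values_alt
  by_cases hlen : PySem.List.len l1 ≠ PySem.List.len l2
  · rw [if_pos hlen, if_pos hlen]
  · have h : l1.length = l2.length := by
      have := not_not.mp hlen
      simpa [PySem.List.len_eq] using this
    rw [if_neg hlen, if_neg hlen]
    rw [PySem.List.foldl_append_singleton_eq_map, List.nil_append, pv_sums_eq l1 l2 h]
    cases l1 with
    | nil =>
      cases l2 with
      | nil => decide
      | cons b t2 => simp at h
    | cons a t1 =>
      cases l2 with
      | nil => simp at h
      | cons b t2 =>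
        simp only [List.zipWith_cons_cons, List.isEmpty_cons, Bool.false_eq_true, if_false,
          PySem.List.pyGetD_zero_cons, List.zip_cons_cons, List.all_cons]
        rw [pv_zip_all a b t1 t2]
        by_cases hall : ∀ x ∈ List.zipWith (· + ·) t1 t2, x = a + b
        · have h1 := (pv_setlen_one_iff (a + b) (List.zipWith (· + ·) t1 t2)).2 hall
          have h2 : (List.zipWith (· + ·) t1 t2).all (fun x => x == a + b) = true := by
            simp only [List.all_eq_true, beq_iff_eq]
            exact hall
          simp [PySem.Set.len, h1, h2]
        · have h1 : ¬ (PySem.Set.ofList ((a + b) :: List.zipWith (· + ·) t1 t2)).length = 1 :=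
            fun hc => hall ((pv_setlen_one_iff (a + b) (List.zipWith (· + ·) t1 t2)).1 hc)
          have h2 : (List.zipWith (· + ·) t1 t2).all (fun x => x == a + b) = false := by
            simp only [List.all_eq_false]
            obtain ⟨x, hx, hne⟩ := not_forall₂.mp hall
            exact ⟨x, hx, by simp [hne]⟩
          simp [PySem.Set.len, h1, h2]
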